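-- pv_equiv track=rewrite | github.com/abhaythakur754-0/parwa | shared/guardrails/guardrails.py | _sanitize_hallucinations
-- ===== SOURCE A (Python) =====
-- def _sanitize_hallucinations(text: str) -> str:
--     """Remove or modify hallucination indicators."""
--     sanitized = text
--
--     # Replace definitive claims with hedged language
--     replacements = {
--         "I can confirm that": "Based on the information available,",
--         "I've verified": "It appears that",
--         "I have access to your": "Regarding your",
--         "our records show": "the information suggests",
--         "I can see that": "It seems that",
--     }
--
--     for old, new in replacements.items():
--         sanitized = sanitized.replace(old, new)
--
--     return sanitized
-- ===== SOURCE B (Python) =====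
-- def _sanitize_hallucinations(text: str) -> str:
--     """Remove or modify hallucination indicators."""
--     replacements = {
--         "I can confirm that": "Based on the information available,",
--         "I've verified": "It appears that",
--         "I have access to your": "Regarding your",
--         "our records show": "the information suggests",
--         "I can see that": "It seems that",
--     }
--
--     # Hedge the phrases recursively: each step splits the text on the definitive
--     # phrase and glues the pieces back together with the hedged phrase.
--     def hedge(s, pairs):
--         if not pairs:
--             return s
--         (old, new), rest = pairs[0], pairs[1:]
--         return hedge(new.join(s.split(old)), rest)
--
--     return hedge(text, list(replacements.items()))
-- ===== Notes on version B (the rewrite author's own statement) =====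
-- stated objective: alternative
-- what changed: Each of the five str.replace passes is re-expressed as split-on-the-phrase followed by join-with-the-hedge, and the mutating for-loop over the dict becomes a recursion over the list of pairs (same pass structure, different decomposition).
import Mathlib
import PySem

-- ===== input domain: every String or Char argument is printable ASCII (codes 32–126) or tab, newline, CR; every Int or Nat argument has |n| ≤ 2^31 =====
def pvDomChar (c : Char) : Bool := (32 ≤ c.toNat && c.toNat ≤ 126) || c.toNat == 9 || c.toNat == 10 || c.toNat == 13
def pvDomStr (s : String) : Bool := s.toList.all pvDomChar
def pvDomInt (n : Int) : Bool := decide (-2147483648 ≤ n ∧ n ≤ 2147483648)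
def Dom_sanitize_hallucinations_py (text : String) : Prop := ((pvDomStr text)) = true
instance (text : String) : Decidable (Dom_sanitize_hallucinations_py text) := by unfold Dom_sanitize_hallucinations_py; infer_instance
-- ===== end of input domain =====

-- B re-expresses each replace pass as split-then-join and recurses over the phrase pairs instead of
-- mutating an accumulator in a loop (alternative decomposition; not claimed faster).

-- ===== PORT A =====
def sanitize_hallucinations_py (text : String) : String :=
  -- sanitized = text; for old, new in replacements.items(): sanitized = sanitized.replace(old, new)
  let replacements : List (String × String) :=
    [("I can confirm that", "Based on the information available,"),
     ("I've verified", "It appears that"),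
     ("I have access to your", "Regarding your"),
     ("our records show", "the information suggests"),
     ("I can see that", "It seems that")]
  replacements.foldl (fun sanitized kv => PySem.Str.replace sanitized kv.1 kv.2) text

-- ===== PORT B =====
-- hedge(s, pairs): if not pairs: return s; (old,new), rest = pairs[0], pairs[1:];
--                  return hedge(new.join(s.split(old)), rest)
def hedge : List Char → List (List Char × List Char) → List Char
  | s, [] => s
  | s, (old, new) :: rest => hedge (PySem.Chars.join new (PySem.Chars.splitOn s old)) rest

def sanitize_hallucinations_py_alt (text : String) : String :=
  String.ofList (hedge text.toList
    [("I can confirm that".toList, "Based on the information available,".toList),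
     ("I've verified".toList, "It appears that".toList),
     ("I have access to your".toList, "Regarding your".toList),
     ("our records show".toList, "the information suggests".toList),
     ("I can see that".toList, "It seems that".toList)])

-- ===== PRECONDITION & SPEC =====
def Spec_sanitize_hallucinations_py (text : String) (out : String) : Prop := out = sanitize_hallucinations_py_alt text
instance (text : String) (out : String) : Decidable (Spec_sanitize_hallucinations_py text out) := by unfold Spec_sanitize_hallucinations_py; infer_instance

-- ===== CLAIM (what is proved, stated in full; the proofs are below) =====
def Claim_equal_sanitize_hallucinations_py : Prop := ∀ (text : String), Dom_sanitize_hallucinations_py text → Spec_sanitize_hallucinations_py text (sanitize_hallucinations_py text)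

-- ===== LEMMAS AND PROOFS =====

-- `rep old new l` is Python's l.replace(old, new) as a clean recursion over l (for old ≠ []):
-- replace the leftmost occurrence, continue after it.  `sp old l` is likewise l.split(old).
def rep (o v : List Char) (l : List Char) : List Char :=
  if o.isEmpty then l
  else if o.isPrefixOf l then v ++ rep o v (l.drop o.length)
  else match l with
    | [] => []
    | c :: t => c :: rep o v t
termination_by l.length
decreasing_by
  · rename_i h1 h2
    have ho : o ≠ [] := by simpa [List.isEmpty_iff] using h1
    have hp : o <+: l := List.isPrefixOf_iff_prefix.1 h2
    have := hp.length_le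
    have : 0 < o.length := List.length_pos_of_ne_nil ho
    simp only [List.length_drop]; omega
  · simp

def sp (o : List Char) (l : List Char) : List (List Char) :=
  if o.isEmpty then [l]
  else if o.isPrefixOf l then [] :: sp o (l.drop o.length)
  else match l with
    | [] => [[]]
    | c :: t =>
      match sp o t with
      | [] => [[c]]
      | p :: ps => (c :: p) :: ps
termination_by l.length
decreasing_by
  · rename_i h1 h2
    have ho : o ≠ [] := by simpa [List.isEmpty_iff] using h1
    have hp : o <+: l := List.isPrefixOf_iff_prefix.1 h2
    have := hp.length_le
    have : 0 < o.length := List.length_pos_of_ne_nil ho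
    simp only [List.length_drop]; omega
  · simp

lemma sp_ne_nil (o l : List Char) : sp o l ≠ [] := by
  rw [sp.eq_def]
  split
  · simp
  · split
    · simp
    · split
      · simp
      · split <;> simp

lemma sp_nil (o : List Char) (ho : o ≠ []) : sp o [] = [[]] := by
  rw [sp.eq_def]
  have h1 : ¬ (o.isEmpty = true) := by simpa [List.isEmpty_iff] using ho
  have h2 : ¬ (o.isPrefixOf ([] : List Char) = true) := by
    simp [List.isPrefixOf_iff_prefix, List.prefix_nil]; exact ho
  rw [if_neg h1, if_neg h2]

lemma sp_pos (o : List Char) (l : List Char) (ho : o ≠ []) (h : o <+: l) :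
    sp o l = [] :: sp o (l.drop o.length) := by
  rw [sp.eq_def]
  simp [List.isEmpty_iff, ho, List.isPrefixOf_iff_prefix, h]

lemma sp_neg (o : List Char) (c : Char) (t : List Char) (ho : o ≠ []) (h : ¬ o <+: (c :: t)) :
    sp o (c :: t) = match sp o t with
      | [] => [[c]]
      | p :: ps => (c :: p) :: ps := by
  rw [sp.eq_def]
  simp [List.isEmpty_iff, ho, List.isPrefixOf_iff_prefix, h]

lemma rep_nil (o v : List Char) (ho : o ≠ []) : rep o v [] = [] := by
  rw [rep.eq_def]
  have h1 : ¬ (o.isEmpty = true) := by simpa [List.isEmpty_iff] using ho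
  have h2 : ¬ (o.isPrefixOf ([] : List Char) = true) := by
    simp [List.isPrefixOf_iff_prefix, List.prefix_nil]; exact ho
  rw [if_neg h1, if_neg h2]

lemma rep_pos (o v l : List Char) (ho : o ≠ []) (h : o <+: l) :
    rep o v l = v ++ rep o v (l.drop o.length) := by
  rw [rep.eq_def]
  simp [List.isEmpty_iff, ho, List.isPrefixOf_iff_prefix, h]

lemma rep_neg (o v : List Char) (c : Char) (t : List Char) (ho : o ≠ []) (h : ¬ o <+: (c :: t)) :
    rep o v (c :: t) = c :: rep o v t := by
  rw [rep.eq_def]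
  simp [List.isEmpty_iff, ho, List.isPrefixOf_iff_prefix, h]

-- joining the pieces of `sp` with v is exactly leftmost replacement
lemma join_sp (o v : List Char) (ho : o ≠ []) :
    ∀ N l, l.length ≤ N → PySem.Chars.join v (sp o l) = rep o v l := by
  intro N
  induction N with
  | zero =>
    intro l hl
    have : l = [] := List.eq_nil_of_length_eq_zero (Nat.le_zero.1 hl)
    subst this
    rw [sp_nil o ho, rep_nil o v ho]
    simp [PySem.Chars.join_singleton]
  | succ n ih =>
    intro l hl
    by_cases hp : o <+: l
    · have hlen : 0 < o.length := List.length_pos_of_ne_nil ho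
      have hle := hp.length_le
      rw [sp_pos o l ho hp, rep_pos o v l ho hp]
      rcases hsp : sp o (l.drop o.length) with - | ⟨p, ps⟩
      · exact absurd hsp (sp_ne_nil _ _)
      · rw [PySem.Chars.join_cons_cons]
        rw [← hsp, ih _ (by simp only [List.length_drop]; omega)]
        simp
    · cases l with
      | nil =>
        rw [sp_nil o ho, rep_nil o v ho]
        simp [PySem.Chars.join_singleton]
      | cons c t =>
        rw [sp_neg o c t ho hp, rep_neg o v c t ho hp]
        rcases hsp : sp o t with - | ⟨p, ps⟩
        · exact absurd hsp (sp_ne_nil _ _)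
        · have iht := ih t (by simp at hl; omega)
          rw [hsp] at iht
          cases ps with
          | nil =>
            rw [PySem.Chars.join_singleton] at iht ⊢
            simp [iht]
          | cons p2 ps2 =>
            rw [PySem.Chars.join_cons_cons] at iht ⊢
            simp [iht]

lemma go_eq_sp (o : List Char) (ho : o ≠ []) :
    ∀ fuel l cur acc, l.length < fuel →
      PySem.Chars.splitOn.go o fuel l cur acc =
        acc.reverse ++ (sp o l).modifyHead (cur.reverse ++ ·) := by
  intro fuel
  induction fuel with
  | zero => intro l cur acc hl; omega
  | succ n ih =>
    intro l cur acc hl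
    cases l with
    | nil =>
      rw [PySem.Chars.splitOn.go, sp_nil o ho]
      · simp
      · omega
    | cons c rest =>
      rw [PySem.Chars.splitOn.go]
      by_cases hp : o.isPrefixOf (c :: rest)
      · have hp' : o <+: (c :: rest) := List.isPrefixOf_iff_prefix.1 hp
        have hlen : 0 < o.length := List.length_pos_of_ne_nil ho
        have hle := hp'.length_le
        rw [if_pos hp, ih _ _ _ (by simp only [List.length_drop]; simp at hl ⊢; omega)]
        rw [sp_pos o _ ho hp']
        rcases hsp : sp o ((c :: rest).drop o.length) with - | ⟨p, ps⟩
        · exact absurd hsp (sp_ne_nil _ _)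
        · simp
      · rw [if_neg hp, ih _ _ _ (by simp at hl ⊢; omega)]
        rw [sp_neg o c rest ho (fun hx => hp (List.isPrefixOf_iff_prefix.2 hx))]
        rcases hsp : sp o rest with - | ⟨p, ps⟩
        · exact absurd hsp (sp_ne_nil _ _)
        · simp

lemma splitOn_eq_sp (l o : List Char) (ho : o ≠ []) : PySem.Chars.splitOn l o = sp o l := by
  unfold PySem.Chars.splitOn
  rw [go_eq_sp o ho _ l [] [] (by omega)]
  rcases hsp : sp o l with - | ⟨p, ps⟩
  · exact absurd hsp (sp_ne_nil _ _)
  · simp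

-- gluing the split pieces with v is exactly Python's replace
lemma join_splitOn (o v l : List Char) (ho : o ≠ []) :
    PySem.Chars.join v (PySem.Chars.splitOn l o) = rep o v l := by
  rw [splitOn_eq_sp l o ho, join_sp o v ho l.length l le_rfl]

-- bridge: PySem.Chars.replace's fuelled accumulator loop computes `rep`
lemma go_eq (o v : List Char) (ho : o ≠ []) :
    ∀ fuel l acc, l.length ≤ fuel →
      PySem.Chars.replace.go o v fuel l acc = acc.reverse ++ rep o v l := by
  intro fuel
  induction fuel with
  | zero =>
    intro l acc hl
    have : l = [] := List.eq_nil_of_length_eq_zero (Nat.le_zero.1 hl)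
    subst this
    simp [PySem.Chars.replace.go, rep_nil o v ho]
  | succ n ih =>
    intro l acc hl
    cases l with
    | nil => simp [PySem.Chars.replace.go, rep_nil o v ho]
    | cons c t =>
      rw [PySem.Chars.replace.go]
      by_cases hp : o.isPrefixOf (c :: t)
      · have hp' : o <+: (c :: t) := List.isPrefixOf_iff_prefix.1 hp
        have hlen : 0 < o.length := List.length_pos_of_ne_nil ho
        have hle := hp'.length_le
        rw [if_pos hp, ih _ _ (by simp only [List.length_drop]; simp at hl ⊢; omega)]
        rw [rep_pos o v _ ho hp']
        simp
      · rw [if_neg hp, ih t (c :: acc) (by simpa using Nat.le_of_succ_le_succ (by simpa using hl))]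
        rw [rep_neg o v c t ho (fun hx => hp (List.isPrefixOf_iff_prefix.2 hx))]
        simp

lemma replace_eq_rep (o v l : List Char) (ho : o ≠ []) :
    PySem.Chars.replace l o v = rep o v l := by
  unfold PySem.Chars.replace
  rw [if_neg (by simpa [List.isEmpty_iff] using ho)]
  simpa using go_eq o v ho l.length l [] le_rfl

lemma final (text : String) :
    sanitize_hallucinations_py text = sanitize_hallucinations_py_alt text := by
  have hA : (sanitize_hallucinations_py text).toList =
      rep "I can see that".toList "It seems that".toList
        (rep "our records show".toList "the information suggests".toList
          (rep "I have access to your".toList "Regarding your".toList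
            (rep "I've verified".toList "It appears that".toList
              (rep "I can confirm that".toList "Based on the information available,".toList
                text.toList)))) := by
    show (PySem.Str.replace (PySem.Str.replace (PySem.Str.replace (PySem.Str.replace
      (PySem.Str.replace text "I can confirm that" "Based on the information available,")
      "I've verified" "It appears that") "I have access to your" "Regarding your")
      "our records show" "the information suggests") "I can see that" "It seems that").toList = _
    rw [PySem.Str.toList_replace, PySem.Str.toList_replace, PySem.Str.toList_replace,
      PySem.Str.toList_replace, PySem.Str.toList_replace]
    rw [replace_eq_rep _ _ _ (by decide), replace_eq_rep _ _ _ (by decide),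
      replace_eq_rep _ _ _ (by decide), replace_eq_rep _ _ _ (by decide),
      replace_eq_rep _ _ _ (by decide)]
  have hB : (sanitize_hallucinations_py_alt text).toList =
      rep "I can see that".toList "It seems that".toList
        (rep "our records show".toList "the information suggests".toList
          (rep "I have access to your".toList "Regarding your".toList
            (rep "I've verified".toList "It appears that".toList
              (rep "I can confirm that".toList "Based on the information available,".toList
                text.toList)))) := by
    rw [sanitize_hallucinations_py_alt, String.toList_ofList]
    rw [hedge, hedge, hedge, hedge, hedge, hedge]
    rw [join_splitOn _ _ _ (by decide), join_splitOn _ _ _ (by decide),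
      join_splitOn _ _ _ (by decide), join_splitOn _ _ _ (by decide),
      join_splitOn _ _ _ (by decide)]
  have ht : (sanitize_hallucinations_py text).toList = (sanitize_hallucinations_py_alt text).toList := by
    rw [hA, hB]
  have := congrArg String.ofList ht
  simpa [String.ofList_toList] using this

-- ===== VERDICT (by name: the statement is the Claim_ definition above) =====
theorem sanitize_hallucinations_py_spec : Claim_equal_sanitize_hallucinations_py := by
  intro text _
  unfold Spec_sanitize_hallucinations_py
  exact final text
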